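-- pv_equiv track=rewrite | github.com/kylmcgr/CS1 | midterm.py | draw_checkerboard
-- ===== SOURCE A (Python) =====
-- def draw_checkerboard(nrows, ncols):
--     '''
--     Return a string that, when printed, will draw an (nrows x ncols)
--     checkerboard on the terminal, where 'nrows' and 'ncols' are positive
--     integers.
--
--     The light squares are blank, the dark squares have a '#' character.
--     The board is made up of lines and corners.
--     Corners are represented by '+' characters.
--     Horizontal lines are represented by '-' characters.
--     Vertical lines are represented by '|' characters.
--     The lower-left square of the bottommost row is black.
--
--     Arguments:
--       nrows: the number of rows
--       ncols: the number of columns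
--
--     Return value: a string representing the checkerboard, suitable for printing
--       to the terminal.  The string, when printed, will have a blank line before
--       and after the checkerboard.
--
--     '''
--
--     assert nrows >= 1
--     assert ncols >= 1
--     board = "\n+" + ("-+" * ncols) + "\n"
--     for i in range(nrows):
--         board += "|"
--         for j in range(ncols):
--             board += " |" * ((nrows - i - j - 1) % 2)
--             board += "#|" * ((nrows - i - j) % 2)
--         board += "\n+" + ("-+" * ncols) + "\n"
--     return board
-- ===== SOURCE B (Python) =====
-- def draw_checkerboard(nrows, ncols):
--     assert nrows >= 1
--     assert ncols >= 1
--     sep = "+" + "-+" * ncols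
--     row_dark = "|" + ("#| |" * ncols)[:2 * ncols]
--     row_light = "|" + (" |#|" * ncols)[:2 * ncols]
--     pieces = ["", sep]
--     for i in range(nrows):
--         pieces.append(row_dark if (nrows - i) % 2 else row_light)
--         pieces.append(sep)
--     return "\n".join(pieces) + "\n"
-- ===== Notes on version B (the rewrite author's own statement) =====
-- stated objective: simpler
-- what changed: B precomputes the separator line and the two alternating row templates once (by repetition and slicing) and then just selects a template per row by the row's parity and joins the pieces, replacing A's per-cell parity arithmetic with nested loops and repeated string concatenation.
import Mathlib
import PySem

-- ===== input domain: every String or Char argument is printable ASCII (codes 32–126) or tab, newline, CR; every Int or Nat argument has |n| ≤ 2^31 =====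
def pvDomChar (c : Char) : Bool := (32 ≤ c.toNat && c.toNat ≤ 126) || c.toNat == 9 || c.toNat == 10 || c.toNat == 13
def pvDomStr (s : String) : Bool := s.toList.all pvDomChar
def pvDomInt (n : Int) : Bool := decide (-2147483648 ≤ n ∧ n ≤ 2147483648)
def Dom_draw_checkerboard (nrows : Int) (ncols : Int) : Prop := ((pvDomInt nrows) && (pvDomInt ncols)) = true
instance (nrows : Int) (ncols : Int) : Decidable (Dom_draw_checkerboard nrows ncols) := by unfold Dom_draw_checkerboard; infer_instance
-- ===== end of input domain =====

-- B replaces A's per-cell parity arithmetic by two precomputed row templates and a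
-- precomputed separator, selecting a template per row and joining (objective: simpler).

-- ===== PORT A =====
-- builds the board character list exactly as A concatenates strings
def draw_checkerboard (nrows : Int) (ncols : Int) : String :=
  String.ofList (
    (PySem.List.pyRange 0 nrows).foldl (fun board i =>
      let board := board ++ ['|']
      let board := (PySem.List.pyRange 0 ncols).foldl (fun b j =>
        (b ++ PySem.List.pyRepeat [' ', '|'] (PySem.Int.mod (nrows - i - j - 1) 2))
          ++ PySem.List.pyRepeat ['#', '|'] (PySem.Int.mod (nrows - i - j) 2)) board
      board ++ ('\n' :: '+' :: PySem.List.pyRepeat ['-', '+'] ncols ++ ['\n']))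
      ('\n' :: '+' :: PySem.List.pyRepeat ['-', '+'] ncols ++ ['\n']))

-- ===== PORT B =====
def draw_checkerboard_alt (nrows : Int) (ncols : Int) : String :=
  let sep := '+' :: PySem.List.pyRepeat ['-', '+'] ncols
  let rowDark := '|' :: PySem.List.slice (PySem.List.pyRepeat ['#', '|', ' ', '|'] ncols) none (some (2 * ncols))
  let rowLight := '|' :: PySem.List.slice (PySem.List.pyRepeat [' ', '|', '#', '|'] ncols) none (some (2 * ncols))
  let pieces := (PySem.List.pyRange 0 nrows).foldl (fun ps i =>
    (ps ++ [if PySem.Int.mod (nrows - i) 2 ≠ 0 then rowDark else rowLight]) ++ [sep])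
    [[], sep]
  String.ofList (PySem.Chars.join ['\n'] pieces ++ ['\n'])

-- ===== PRECONDITION & SPEC =====
-- A asserts nrows >= 1 and ncols >= 1 (AssertionError otherwise): exactly those inputs are excluded
def Pre_draw_checkerboard (nrows : Int) (ncols : Int) : Prop := 1 ≤ nrows ∧ 1 ≤ ncols
instance (nrows : Int) (ncols : Int) : Decidable (Pre_draw_checkerboard nrows ncols) := by unfold Pre_draw_checkerboard; infer_instance
def pvWitness_draw_checkerboard : Int × Int := (3, 4)

def Spec_draw_checkerboard (nrows : Int) (ncols : Int) (out : String) : Prop := out = draw_checkerboard_alt nrows ncols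
instance (nrows : Int) (ncols : Int) (out : String) : Decidable (Spec_draw_checkerboard nrows ncols out) := by unfold Spec_draw_checkerboard; infer_instance

-- ===== CLAIM (what is proved, stated in full; the proofs are below) =====
def Claim_equal_draw_checkerboard : Prop := ∀ (nrows : Int) (ncols : Int), Dom_draw_checkerboard nrows ncols → Pre_draw_checkerboard nrows ncols → Spec_draw_checkerboard nrows ncols (draw_checkerboard nrows ncols)

-- ===== LEMMAS AND PROOFS =====

-- alternating run of k cells, starting with a dark cell iff b = true
def pvAlt : Bool → Nat → List Char
  | _, 0 => []
  | b, (k+1) => (if b then ['#', '|'] else [' ', '|']) ++ pvAlt (!b) k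

-- the separator line (without newlines) for ncols columns
def pvSep (ncols : Int) : List Char := '+' :: PySem.List.pyRepeat ['-', '+'] ncols

-- the canonical tail of the board: k remaining rows, current row index i
def pvTail (nrows ncols : Int) : Nat → Int → List Char
  | 0, _ => []
  | (k+1), i =>
      '|' :: pvAlt (PySem.Int.mod (nrows - i) 2 == 1) ncols.toNat
        ++ '\n' :: pvSep ncols ++ '\n' :: pvTail nrows ncols k (i + 1)

lemma pvMod_flip (q : Int) : PySem.Int.mod (q - 1) 2 = 1 - PySem.Int.mod q 2 := by
  rw [PySem.Int.mod_eq_emod_of_pos (a := q - 1) (by norm_num),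
      PySem.Int.mod_eq_emod_of_pos (a := q) (by norm_num)]
  omega

-- A's inner loop produces an alternating run
lemma pvInnerA (p : Int) : ∀ (k : Nat) (j0 hi : Int), hi - j0 = k → ∀ acc : List Char,
    (PySem.List.pyRange j0 hi).foldl (fun b j =>
        (b ++ PySem.List.pyRepeat [' ', '|'] (PySem.Int.mod (p - j - 1) 2))
          ++ PySem.List.pyRepeat ['#', '|'] (PySem.Int.mod (p - j) 2)) acc
      = acc ++ pvAlt (PySem.Int.mod (p - j0) 2 == 1) k := by
  intro k
  induction k with
  | zero =>
      intro j0 hi h acc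
      have : hi ≤ j0 := by omega
      simp [pysem, this, pvAlt]
  | succ k ih =>
      intro j0 hi h acc
      rw [PySem.List.pyRange_one_cons (a := j0) (b := hi) (by omega)]
      simp only [List.foldl_cons]
      have e : p - (j0 + 1) = p - j0 - 1 := by ring
      rcases PySem.Int.mod_two_eq (p - j0) with h0 | h0
      · have h1 : PySem.Int.mod (p - j0 - 1) 2 = 1 := by
          rw [pvMod_flip, h0]; norm_num
        have h2 : PySem.Int.mod (p - (j0 + 1)) 2 = 1 := by rw [e]; exact h1
        rw [ih (j0 + 1) hi (by omega)]
        simp only [h0, h1, h2]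
        simp [pvAlt, PySem.List.pyRepeat]
      · have h1 : PySem.Int.mod (p - j0 - 1) 2 = 0 := by
          rw [pvMod_flip, h0]; norm_num
        have h2 : PySem.Int.mod (p - (j0 + 1)) 2 = 0 := by rw [e]; exact h1
        rw [ih (j0 + 1) hi (by omega)]
        simp only [h0, h1, h2]
        simp [pvAlt, PySem.List.pyRepeat]

-- A's outer loop produces the canonical tail
lemma pvOuterA (nrows ncols : Int) (hc : 0 ≤ ncols) :
    ∀ (k : Nat) (i : Int), nrows - i = k → ∀ acc : List Char,
    (PySem.List.pyRange i nrows).foldl (fun board i =>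
        ((PySem.List.pyRange 0 ncols).foldl (fun b j =>
            (b ++ PySem.List.pyRepeat [' ', '|'] (PySem.Int.mod (nrows - i - j - 1) 2))
              ++ PySem.List.pyRepeat ['#', '|'] (PySem.Int.mod (nrows - i - j) 2))
          (board ++ ['|']))
          ++ ('\n' :: '+' :: PySem.List.pyRepeat ['-', '+'] ncols ++ ['\n'])) acc
      = acc ++ pvTail nrows ncols k i := by
  intro k
  induction k with
  | zero =>
      intro i h acc
      have hle : nrows ≤ i := by omega
      rw [PySem.List.pyRange_one_eq_nil hle]
      simp [pvTail]
  | succ k ih =>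
      intro i h acc
      rw [PySem.List.pyRange_one_cons (a := i) (b := nrows) (by omega)]
      simp only [List.foldl_cons]
      rw [pvInnerA (nrows - i) ncols.toNat 0 ncols (by omega)]
      rw [ih (i + 1) (by omega)]
      have e : nrows - i - (0 : Int) = nrows - i := by ring
      rw [e]
      simp [pvTail, pvSep, List.append_assoc]

-- first m pair-cells of c copies of the dark 4-block
lemma pvTakeDark : ∀ (k m : Nat), m ≤ 2 * k →
    (List.replicate k (['#', '|', ' ', '|'] : List Char)).flatten.take (2 * m) = pvAlt true m := by
  intro k
  induction k with
  | zero => intro m hm; interval_cases m; simp [pvAlt]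
  | succ k ih =>
      intro m hm
      rcases m with _ | m
      · simp [pvAlt]
      rcases m with _ | m
      · simp [List.replicate_succ, pvAlt]
      · have e : 2 * (m + 1 + 1) = 2 * m + 4 := by ring
        have e2 : pvAlt true (m + 1 + 1) = '#' :: '|' :: ' ' :: '|' :: pvAlt true m := by
          simp [pvAlt]
        rw [e, e2, List.replicate_succ]
        simp only [List.flatten_cons, List.cons_append, List.nil_append]
        have e3 : 2 * m + 4 = ((((2 * m) + 1) + 1) + 1) + 1 := by ring
        rw [e3]
        simp only [List.take_succ_cons]
        rw [ih m (by omega)]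

lemma pvTakeLight : ∀ (k m : Nat), m ≤ 2 * k →
    (List.replicate k (([' ', '|', '#', '|']) : List Char)).flatten.take (2 * m) = pvAlt false m := by
  intro k
  induction k with
  | zero => intro m hm; interval_cases m; simp [pvAlt]
  | succ k ih =>
      intro m hm
      rcases m with _ | m
      · simp [pvAlt]
      rcases m with _ | m
      · simp [List.replicate_succ, pvAlt]
      · have e : 2 * (m + 1 + 1) = 2 * m + 4 := by ring
        have e2 : pvAlt false (m + 1 + 1) = ' ' :: '|' :: '#' :: '|' :: pvAlt false m := by
          simp [pvAlt]
        rw [e, e2, List.replicate_succ]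
        simp only [List.flatten_cons, List.cons_append, List.nil_append]
        have e3 : 2 * m + 4 = ((((2 * m) + 1) + 1) + 1) + 1 := by ring
        rw [e3]
        simp only [List.take_succ_cons]
        rw [ih m (by omega)]

-- B's sliced templates are the alternating runs
lemma pvRowDark (ncols : Int) (hc : 0 ≤ ncols) :
    PySem.List.slice (PySem.List.pyRepeat ['#', '|', ' ', '|'] ncols) none (some (2 * ncols))
      = pvAlt true ncols.toNat := by
  rw [PySem.List.slice_to _ (by omega)]
  have e : (2 * ncols).toNat = 2 * ncols.toNat := by omega
  rw [e]
  exact pvTakeDark ncols.toNat ncols.toNat (by omega)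

lemma pvRowLight (ncols : Int) (hc : 0 ≤ ncols) :
    PySem.List.slice (PySem.List.pyRepeat [' ', '|', '#', '|'] ncols) none (some (2 * ncols))
      = pvAlt false ncols.toNat := by
  rw [PySem.List.slice_to _ (by omega)]
  have e : (2 * ncols).toNat = 2 * ncols.toNat := by omega
  rw [e]
  exact pvTakeLight ncols.toNat ncols.toNat (by omega)

-- the list of pieces B accumulates after the first two
def pvPieces (nrows ncols : Int) : Nat → Int → List (List Char)
  | 0, _ => []
  | (k+1), i =>
      ('|' :: pvAlt (PySem.Int.mod (nrows - i) 2 == 1) ncols.toNat)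
        :: pvSep ncols :: pvPieces nrows ncols k (i + 1)

lemma pvOuterB (nrows ncols : Int) (hc : 0 ≤ ncols) :
    ∀ (k : Nat) (i : Int), nrows - i = k → ∀ ps : List (List Char),
    (PySem.List.pyRange i nrows).foldl (fun ps i =>
        (ps ++ [if PySem.Int.mod (nrows - i) 2 ≠ 0 then
            '|' :: PySem.List.slice (PySem.List.pyRepeat ['#', '|', ' ', '|'] ncols) none (some (2 * ncols))
          else
            '|' :: PySem.List.slice (PySem.List.pyRepeat [' ', '|', '#', '|'] ncols) none (some (2 * ncols))])
          ++ ['+' :: PySem.List.pyRepeat ['-', '+'] ncols]) ps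
      = ps ++ pvPieces nrows ncols k i := by
  intro k
  induction k with
  | zero =>
      intro i h ps
      have hle : nrows ≤ i := by omega
      rw [PySem.List.pyRange_one_eq_nil hle]
      simp [pvPieces]
  | succ k ih =>
      intro i h ps
      rw [PySem.List.pyRange_one_cons (a := i) (b := nrows) (by omega)]
      simp only [List.foldl_cons]
      rw [ih (i + 1) (by omega)]
      rw [pvRowDark ncols hc, pvRowLight ncols hc]
      have hrow : (if PySem.Int.mod (nrows - i) 2 ≠ 0 then
            '|' :: pvAlt true ncols.toNat else '|' :: pvAlt false ncols.toNat)
          = '|' :: pvAlt (PySem.Int.mod (nrows - i) 2 == 1) ncols.toNat := by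
        rcases PySem.Int.mod_two_eq (nrows - i) with h0 | h0 <;> rw [h0] <;> simp
      rw [hrow]
      simp [pvPieces, pvSep, List.append_assoc]

-- join over a cons pair
lemma pvJoin_cons (a b : List Char) (l : List (List Char)) :
    PySem.Chars.join ['\n'] (a :: b :: l) = a ++ '\n' :: PySem.Chars.join ['\n'] (b :: l) := by
  simp [PySem.Chars.join, List.intercalate]

lemma pvJoin (nrows ncols : Int) : ∀ (k : Nat) (i : Int),
    PySem.Chars.join ['\n'] (pvSep ncols :: pvPieces nrows ncols k i) ++ ['\n']
      = pvSep ncols ++ '\n' :: pvTail nrows ncols k i := by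
  intro k
  induction k with
  | zero =>
      intro i
      simp [PySem.Chars.join, List.intercalate, pvPieces, pvTail]
  | succ k ih =>
      intro i
      simp only [pvPieces]
      rw [pvJoin_cons, pvJoin_cons]
      simp only [List.append_assoc, List.cons_append]
      rw [ih (i + 1)]
      simp [pvTail, List.append_assoc]

-- ===== VERDICT (by name: the statement is the Claim_ definition above) =====
theorem draw_checkerboard_spec : Claim_equal_draw_checkerboard := by
  intro nrows ncols hdom hpre
  obtain ⟨hr, hc⟩ := hpre
  unfold Spec_draw_checkerboard
  simp only [draw_checkerboard, draw_checkerboard_alt]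
  rw [pvOuterA nrows ncols (by omega) nrows.toNat 0 (by omega)]
  rw [pvOuterB nrows ncols (by omega) nrows.toNat 0 (by omega)]
  apply congrArg
  have e1 : ([[], '+' :: PySem.List.pyRepeat ['-', '+'] ncols] : List (List Char))
      ++ pvPieces nrows ncols nrows.toNat 0
      = [] :: pvSep ncols :: pvPieces nrows ncols nrows.toNat 0 := by
    simp [pvSep]
  rw [e1, pvJoin_cons, List.cons_append, List.nil_append]
  simp only [List.cons_append, List.append_assoc, List.nil_append]
  rw [pvJoin]
  simp [pvSep]
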